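-- pv_equiv track=rewrite | github.com/PhongNTDo/Europe-KG-RAG | europe_kg_rag/retrieval/entity_extraction.py | _collect_entities_from_facts
-- ===== SOURCE A (Python) =====
-- from typing import Iterable, List
--
-- def _collect_entities_from_facts(facts: Iterable[str]) -> set[str]:
--     entity_names: set[str] = set()
--     for fact in facts:
--         segments = fact.split("[")
--         for segment in segments:
--             if "]" in segment:
--                 entity_names.add(segment.split("]", 1)[0])
--     return entity_names
-- ===== SOURCE B (Python) =====
-- from typing import Iterable
--
-- def _collect_entities_from_facts(facts: Iterable[str]) -> set[str]:
--     entity_names: set[str] = set()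
--     for fact in facts:
--         buf: list[str] = []
--         closed = False
--         for ch in fact:
--             if ch == '[':
--                 buf = []
--                 closed = False
--             elif ch == ']':
--                 if not closed:
--                     entity_names.add(''.join(buf))
--                     closed = True
--             elif not closed:
--                 buf.append(ch)
--     return entity_names
-- ===== Notes on version B (the rewrite author's own statement) =====
-- stated objective: alternative
-- what changed: Replaces per-fact split('[') plus a nested loop with split(']',1) per segment by a single character-by-character state-machine pass over each fact (current buffer + a 'closed' flag), emitting each entity at its closing bracket with no intermediate segment lists.
import Mathlib
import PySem

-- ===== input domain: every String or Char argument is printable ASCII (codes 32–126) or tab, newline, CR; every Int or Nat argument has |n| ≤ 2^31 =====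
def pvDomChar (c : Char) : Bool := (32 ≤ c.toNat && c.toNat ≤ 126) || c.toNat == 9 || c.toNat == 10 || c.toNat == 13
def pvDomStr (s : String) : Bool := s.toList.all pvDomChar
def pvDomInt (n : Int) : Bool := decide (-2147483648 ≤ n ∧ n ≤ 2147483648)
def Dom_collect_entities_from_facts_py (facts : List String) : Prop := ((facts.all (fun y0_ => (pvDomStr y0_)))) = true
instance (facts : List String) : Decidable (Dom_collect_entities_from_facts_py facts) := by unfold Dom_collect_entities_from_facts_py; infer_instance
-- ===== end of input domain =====

-- B replaces split('[') plus a nested split(']',1) loop by a single per-character state-machine pass (alternative, same cost).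

-- ===== PORT A =====
def collect_entities_from_facts_py (facts : List String) : List String :=
  facts.foldl (fun entity_names fact =>
    let segments := (PySem.Str.split? fact "[").getD []
    segments.foldl (fun entity_names segment =>
      if PySem.Str.isIn "]" segment then
        PySem.Set.add entity_names (((PySem.Str.splitMax? segment "]" 1).getD []).headD "")
      else entity_names) entity_names) PySem.Set.empty

-- ===== PORT B =====
-- per-fact character scan: buf = chars of the current segment read so far, closed = entity already emitted for this segment
def altScan (acc : PySem.Set String) (buf : List Char) (closed : Bool) : List Char → PySem.Set String
  | [] => acc
  | c :: rest =>
    if c = '[' then altScan acc [] false rest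
    else if c = ']' then
      if closed then altScan acc buf true rest
      else altScan (PySem.Set.add acc (String.ofList buf)) buf true rest
    else if closed then altScan acc buf true rest
    else altScan acc (buf ++ [c]) closed rest

def collect_entities_from_facts_py_alt (facts : List String) : List String :=
  facts.foldl (fun acc fact => altScan acc [] false fact.toList) PySem.Set.empty

-- ===== PRECONDITION & SPEC =====
def Spec_collect_entities_from_facts_py (facts : List String) (out : List String) : Prop := out = collect_entities_from_facts_py_alt facts
instance (facts : List String) (out : List String) : Decidable (Spec_collect_entities_from_facts_py facts out) := by unfold Spec_collect_entities_from_facts_py; infer_instance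

-- ===== CLAIM (what is proved, stated in full; the proofs are below) =====
def Claim_equal_collect_entities_from_facts_py : Prop := ∀ (facts : List String), Dom_collect_entities_from_facts_py facts → Spec_collect_entities_from_facts_py facts (collect_entities_from_facts_py facts)

-- ===== LEMMAS AND PROOFS =====

-- the '['-segments of a char list, given the already-read prefix `pre` of the current segment
def segsFrom (pre : List Char) : List Char → List (List Char)
  | [] => [pre]
  | c :: rest => if c = '[' then pre :: segsFrom [] rest else segsFrom (pre ++ [c]) rest

-- A's inner loop, phrased on char-list segments
def foldSegs (acc : PySem.Set String) (segs : List (List Char)) : PySem.Set String :=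
  segs.foldl (fun e seg =>
    if ']' ∈ seg then PySem.Set.add e (String.ofList (seg.takeWhile (· ≠ ']'))) else e) acc

theorem go_eq (fuel : Nat) : ∀ (l cur : List Char) (accs : List (List Char)),
    l.length < fuel →
    PySem.Chars.splitOn.go ['['] fuel l cur accs = accs.reverse ++ segsFrom cur.reverse l := by
  induction fuel with
  | zero => intro l cur accs h; omega
  | succ n ih =>
    intro l cur accs h
    match l with
    | [] => simp [PySem.Chars.splitOn.go, segsFrom]
    | c :: rest =>
      rw [PySem.Chars.splitOn.go]
      by_cases hc : c = '['
      · subst hc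
        simp only [List.isPrefixOf]
        rw [ih _ _ _ (by simpa using Nat.lt_of_succ_lt_succ h)]
        simp [segsFrom]
      · have : List.isPrefixOf ['['] (c :: rest) = false := by
          simp [List.isPrefixOf]; exact fun hh => hc hh.symm
        rw [if_neg (by simp [this])]
        rw [ih _ _ _ (by simpa using Nat.lt_of_succ_lt_succ h)]
        simp [segsFrom, hc]

theorem goM0 (fuel : Nat) (l cur : List Char) (accs : List (List Char)) :
    PySem.Chars.splitOnMax.go [']'] fuel 0 l cur accs = accs.reverse ++ [cur.reverse ++ l] := by
  match fuel, l with
  | 0, l => rw [PySem.Chars.splitOnMax.go]; simp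
  | n+1, [] => rw [PySem.Chars.splitOnMax.go]; simp; omega
  | n+1, c :: rest => rw [PySem.Chars.splitOnMax.go]; simp

theorem goM1 (fuel : Nat) : ∀ (l cur : List Char) (accs : List (List Char)),
    l.length < fuel →
    PySem.Chars.splitOnMax.go [']'] fuel 1 l cur accs =
      if ']' ∈ l then accs.reverse ++ [cur.reverse ++ l.takeWhile (· ≠ ']'), (l.dropWhile (· ≠ ']')).tail]
      else accs.reverse ++ [cur.reverse ++ l] := by
  induction fuel with
  | zero => intro l cur accs h; omega
  | succ n ih =>
    intro l cur accs h
    match l with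
    | [] => rw [PySem.Chars.splitOnMax.go]; simp; omega
    | c :: rest =>
      rw [PySem.Chars.splitOnMax.go]
      by_cases hc : c = ']'
      · subst hc
        have hp : List.isPrefixOf [']'] (']' :: rest) = true := by simp [List.isPrefixOf]
        simp only [hp, if_pos, if_neg (by norm_num : ¬ (1:Nat) = 0)]
        rw [goM0]
        simp [List.takeWhile, List.dropWhile]
      · have hp : List.isPrefixOf [']'] (c :: rest) = false := by
          simp [List.isPrefixOf]; exact fun hh => hc hh.symm
        simp only [hp, if_neg (by norm_num : ¬ (1:Nat) = 0), Bool.false_eq_true, if_false]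
        rw [ih _ _ _ (by simpa using Nat.lt_of_succ_lt_succ h)]
        by_cases hm : ']' ∈ rest <;> simp [hm, hc, Ne.symm hc]

theorem isIn_close_iff (s : String) : PySem.Str.isIn "]" s = true ↔ ']' ∈ s.toList := by
  rw [PySem.Str.isIn_iff_infix]
  constructor
  · intro h
    exact List.singleton_sublist.mp h.sublist
  · intro h
    obtain ⟨l1, l2, hrep⟩ := List.append_of_mem h
    exact ⟨l1, l2, by simp [hrep]⟩

theorem takeWhile_append_of_mem (pre xs : List Char) (h : ']' ∈ pre) :
    (pre ++ xs).takeWhile (· ≠ ']') = pre.takeWhile (· ≠ ']') := by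
  induction pre with
  | nil => simp at h
  | cons c rest ih =>
    rw [List.cons_append, List.takeWhile_cons, List.takeWhile_cons]
    by_cases hc : c = ']'
    · rw [if_neg (by simp [hc]), if_neg (by simp [hc])]
    · have hr : ']' ∈ rest := by
        rcases List.mem_cons.mp h with h1 | h1
        · exact absurd h1.symm hc
        · exact h1
      rw [if_pos (by simp [hc]), if_pos (by simp [hc]), ih hr]

theorem takeWhile_append_close (buf : List Char) (h : ']' ∉ buf) :
    (buf ++ [']']).takeWhile (· ≠ ']') = buf := by
  induction buf with
  | nil => simp
  | cons c rest ih =>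
    have hc : c ≠ ']' := fun hh => h (by simp [hh])
    have hr : ']' ∉ rest := fun hh => h (by simp [hh])
    rw [List.cons_append, List.takeWhile_cons, if_pos (by simp [hc]), ih hr]

theorem segval (s : String) (h : PySem.Str.isIn "]" s = true) :
    ((PySem.Str.splitMax? s "]" 1).getD []).headD "" = String.ofList (s.toList.takeWhile (· ≠ ']')) := by
  have hm : ']' ∈ s.toList := (isIn_close_iff s).mp h
  simp only [PySem.Str.splitMax?, PySem.Chars.splitMax?, PySem.Chars.splitOnMax]
  rw [if_neg (by simp), if_neg (by norm_num)]
  rw [show ("]".toList : List Char) = [']'] from rfl, show ((1:Int).toNat) = 1 from rfl]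
  rw [goM1 (s.toList.length + 1) s.toList [] [] (by omega)]
  simp [hm]

theorem scan_eq (cs : List Char) :
    (∀ (acc : PySem.Set String) (buf : List Char), ']' ∉ buf →
       altScan acc buf false cs = foldSegs acc (segsFrom buf cs)) ∧
    (∀ (acc : PySem.Set String) (pre buf : List Char), ']' ∈ pre →
       altScan (PySem.Set.add acc (String.ofList (pre.takeWhile (· ≠ ']')))) buf true cs
         = foldSegs acc (segsFrom pre cs)) := by
  induction cs with
  | nil =>
    constructor
    · intro acc buf hb; simp [altScan, segsFrom, foldSegs, hb]
    · intro acc pre buf hp; simp [altScan, segsFrom, foldSegs, hp]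
  | cons c rest ih =>
    constructor
    · intro acc buf hb
      by_cases hc : c = '['
      · subst hc
        rw [show altScan acc buf false ('[' :: rest) = altScan acc [] false rest by simp [altScan]]
        rw [ih.1 acc [] (by simp)]
        simp [segsFrom, foldSegs, hb]
      · by_cases hc2 : c = ']'
        · subst hc2
          rw [show altScan acc buf false (']' :: rest)
                = altScan (PySem.Set.add acc (String.ofList buf)) buf true rest by simp [altScan]]
          have key := ih.2 acc (buf ++ [']']) buf (by simp)
          rw [takeWhile_append_close buf hb] at key
          rw [key]
          simp [segsFrom]
        · rw [show altScan acc buf false (c :: rest) = altScan acc (buf ++ [c]) false rest by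
                simp [altScan, hc, hc2]]
          rw [ih.1 acc (buf ++ [c]) (by simp [hb]; exact fun hh => hc2 hh.symm)]
          simp [segsFrom, hc]
    · intro acc pre buf hp
      by_cases hc : c = '['
      · subst hc
        rw [show ∀ a, altScan a buf true ('[' :: rest) = altScan a [] false rest from
              fun a => by simp [altScan]]
        rw [ih.1 _ [] (by simp)]
        simp [segsFrom, foldSegs, hp]
      · by_cases hc2 : c = ']'
        · subst hc2
          rw [show ∀ a, altScan a buf true (']' :: rest) = altScan a buf true rest from
                fun a => by simp [altScan]]
          have key := ih.2 acc (pre ++ [']']) buf (by simp)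
          rw [takeWhile_append_of_mem pre [']'] hp] at key
          rw [key]
          simp [segsFrom]
        · rw [show ∀ a, altScan a buf true (c :: rest) = altScan a buf true rest from
                fun a => by simp [altScan, hc, hc2]]
          have key := ih.2 acc (pre ++ [c]) buf (by simp [hp])
          rw [takeWhile_append_of_mem pre [c] hp] at key
          rw [key]
          simp [segsFrom, hc]

theorem foldA_eq (segs : List (List Char)) : ∀ (acc : PySem.Set String),
    (segs.map String.ofList).foldl (fun entity_names segment =>
      if PySem.Str.isIn "]" segment then
        PySem.Set.add entity_names (((PySem.Str.splitMax? segment "]" 1).getD []).headD "")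
      else entity_names) acc = foldSegs acc segs := by
  induction segs with
  | nil => intro acc; simp [foldSegs]
  | cons seg rest ih =>
    intro acc
    rw [List.map_cons, List.foldl_cons]
    by_cases h : PySem.Str.isIn "]" (String.ofList seg) = true
    · rw [if_pos h, segval _ h, ih]
      have hm : ']' ∈ seg := by simpa using (isIn_close_iff _).mp h
      simp [foldSegs, hm]
    · rw [if_neg h, ih]
      have hm : ']' ∉ seg := by
        intro hh; exact h ((isIn_close_iff _).mpr (by simpa using hh))
      simp [foldSegs, hm]

theorem fact_eq (acc : PySem.Set String) (fact : String) :
    ((PySem.Str.split? fact "[").getD []).foldl (fun entity_names segment =>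
      if PySem.Str.isIn "]" segment then
        PySem.Set.add entity_names (((PySem.Str.splitMax? segment "]" 1).getD []).headD "")
      else entity_names) acc = altScan acc [] false fact.toList := by
  have hsplit : PySem.Chars.splitOn fact.toList "[".toList = segsFrom [] fact.toList := by
    rw [show ("[".toList : List Char) = ['['] from rfl]
    rw [PySem.Chars.splitOn, go_eq (fact.toList.length + 1) _ _ _ (by omega)]
    simp
  simp only [PySem.Str.split?, PySem.Chars.split?]
  rw [if_neg (by simp)]
  simp only [Option.map_some, Option.getD_some, hsplit]
  rw [foldA_eq, (scan_eq fact.toList).1 acc [] (by simp)]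

theorem foldl_facts_eq (facts : List String) : ∀ (acc : PySem.Set String),
    facts.foldl (fun entity_names fact =>
      ((PySem.Str.split? fact "[").getD []).foldl (fun entity_names segment =>
        if PySem.Str.isIn "]" segment then
          PySem.Set.add entity_names (((PySem.Str.splitMax? segment "]" 1).getD []).headD "")
        else entity_names) entity_names) acc
    = facts.foldl (fun acc fact => altScan acc [] false fact.toList) acc := by
  induction facts with
  | nil => intro acc; rfl
  | cons f rest ih =>
    intro acc
    simp only [List.foldl_cons]
    rw [fact_eq]
    exact ih _

theorem collect_entities_from_facts_py_spec : Claim_equal_collect_entities_from_facts_py := by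
  intro facts _
  unfold Spec_collect_entities_from_facts_py collect_entities_from_facts_py collect_entities_from_facts_py_alt
  simpa using foldl_facts_eq facts PySem.Set.empty
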